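-- pv_equiv track=rewrite | github.com/MatiasCra/advent | 2019/day16.py | pass_filter
-- ===== SOURCE A (Python) =====
-- from itertools import chain, repeat, cycle
--
-- def make_filter(position):
--     base_pattern = (0, 1, 0, -1)
--     filter_iter = cycle(chain(*(repeat(n, position + 1) for n in base_pattern)))
--     next(filter_iter)  # skip the first 0
--     return filter_iter
--
-- def pass_filter(nums):
--     def pass_filter_in_pos(pos):
--         filter_iter = make_filter(pos)
--         s = sum(n * m for (n, m) in zip(nums, filter_iter))
--         return abs(s) % 10
--
--     return tuple(
--         pass_filter_in_pos(i)
--         for i in range(len(nums))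
--     )
-- ===== SOURCE B (Python) =====
-- from itertools import accumulate
--
-- def pass_filter(nums):
--     n = len(nums)
--     pre = list(accumulate(nums, initial=0))
--     out = []
--     for pos in range(n):
--         L = pos + 1
--         s = 0
--         start = pos
--         while start < n:
--             s += pre[min(start + L, n)] - pre[start]
--             start2 = start + 2 * L
--             if start2 < n:
--                 s -= pre[min(start2 + L, n)] - pre[start2]
--             start += 4 * L
--         out.append(abs(s) % 10)
--     return tuple(out)
-- ===== Notes on version B (the rewrite author's own statement) =====
-- stated objective: faster
-- what changed: Replaces per-position dot products with the cycled 0/1/0/-1 pattern by a prefix-sum array queried once per +1/-1 block, so position p costs O(n/p) instead of O(n).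
import Mathlib
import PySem

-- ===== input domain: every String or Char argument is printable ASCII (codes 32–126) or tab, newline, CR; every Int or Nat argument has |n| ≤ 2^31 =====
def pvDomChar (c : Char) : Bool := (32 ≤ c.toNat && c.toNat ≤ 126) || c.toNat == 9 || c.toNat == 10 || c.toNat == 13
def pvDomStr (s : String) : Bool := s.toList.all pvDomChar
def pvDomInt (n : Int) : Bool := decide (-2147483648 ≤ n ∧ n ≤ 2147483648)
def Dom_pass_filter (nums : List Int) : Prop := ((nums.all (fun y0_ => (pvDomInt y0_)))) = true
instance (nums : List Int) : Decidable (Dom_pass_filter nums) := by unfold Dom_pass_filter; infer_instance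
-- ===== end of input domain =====

-- B replaces A's per-position dot product with the cycled 0/1/0/-1 pattern by a
-- prefix-sum array queried once per +1/-1 block (objective: faster).

-- ===== PORT A =====
-- make_filter's infinite iterator cannot be ported directly; its value at zip index i is
-- exactly base_pattern[((i+1) // (pos+1)) % 4] (each pattern entry repeated pos+1 times,
-- cycled, first 0 skipped); this closed index form is exact for every i ≥ 0.
def patAt (pos i : Nat) : Int := ([0, 1, 0, -1] : List Int).getD (((i + 1) / (pos + 1)) % 4) 0

-- 'sum(n * m for (n, m) in zip(nums, filter_iter))' as a fold over the indices of nums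
def pass_filter (nums : List Int) : List Int :=
  (List.range nums.length).map (fun pos =>
    (((List.range nums.length).foldl
        (fun acc i => acc + nums.getD i 0 * patAt pos i) 0).natAbs : Int) % 10)

-- ===== PORT B =====
-- the 'while start < n' loop of Source B, one iteration per +1/-1 block pair
def blockLoop (pre : List Int) (n pos : Nat) (start : Nat) (s : Int) : Int :=
  if _h : start < n then
    let s1 := s + (pre.getD (min (start + (pos + 1)) n) 0 - pre.getD start 0)
    let s2 := if start + 2 * (pos + 1) < n
      then s1 - (pre.getD (min (start + 3 * (pos + 1)) n) 0 - pre.getD (start + 2 * (pos + 1)) 0)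
      else s1
    blockLoop pre n pos (start + 4 * (pos + 1)) s2
  else s
termination_by n - start

-- itertools.accumulate(nums, initial=0) is List.scanl (·+·) 0
def pass_filter_alt (nums : List Int) : List Int :=
  let n := nums.length
  let pre := List.scanl (· + ·) 0 nums
  (List.range n).map (fun pos => (((blockLoop pre n pos pos 0).natAbs : Int)) % 10)

-- ===== PRECONDITION & SPEC =====
def Spec_pass_filter (nums : List Int) (out : List Int) : Prop := out = pass_filter_alt nums
instance (nums : List Int) (out : List Int) : Decidable (Spec_pass_filter nums out) := by unfold Spec_pass_filter; infer_instance

-- ===== CLAIM (what is proved, stated in full; the proofs are below) =====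
def Claim_equal_pass_filter : Prop := ∀ (nums : List Int), Dom_pass_filter nums → Spec_pass_filter nums (pass_filter nums)

-- ===== LEMMAS AND PROOFS =====

theorem nat_lt_four (q : Nat) (h : q < 4) : q = 0 ∨ q = 1 ∨ q = 2 ∨ q = 3 := by omega

-- prefix sums: entry k of scanl is c + sum of the first k elements
theorem scanl_getD (nums : List Int) : ∀ (c : Int) (k : Nat), k ≤ nums.length →
    (List.scanl (· + ·) c nums).getD k 0 = c + ∑ i ∈ Finset.range k, nums.getD i 0 := by
  induction nums with
  | nil =>
    intro c k hk
    have hk0 : k = 0 := by simpa using hk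
    subst hk0
    simp
  | cons x xs ih =>
    intro c k hk
    cases k with
    | zero => simp [List.scanl_cons]
    | succ k =>
      have hk' : k ≤ xs.length := by simpa using hk
      rw [List.scanl_cons, List.getD_cons_succ, ih (c + x) k hk', Finset.sum_range_succ']
      simp only [List.getD_cons_succ, List.getD_cons_zero]
      ring

theorem pre_diff (nums : List Int) (a b : Nat) (hab : a ≤ b) (hb : b ≤ nums.length) :
    (List.scanl (· + ·) 0 nums).getD b 0 - (List.scanl (· + ·) 0 nums).getD a 0
      = ∑ i ∈ Finset.Ico a b, nums.getD i 0 := by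
  rw [scanl_getD nums 0 b hb, scanl_getD nums 0 a (le_trans hab hb),
      Finset.sum_Ico_eq_sub _ hab]
  ring

-- pattern value inside a period starting at pos + 4(pos+1)k, offset j < 4(pos+1)
theorem patAt_period (pos k j : Nat) (hj : j < 4 * (pos + 1)) :
    patAt pos (pos + 4 * (pos + 1) * k + j)
      = if j < pos + 1 then 1 else if j < 2 * (pos + 1) then 0
        else if j < 3 * (pos + 1) then -1 else 0 := by
  have hL : 0 < pos + 1 := Nat.succ_pos pos
  have hidx : (pos + 4 * (pos + 1) * k + j + 1) = (pos + 1) * (4 * k + 1) + j := by ring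
  have hdiv : (pos + 4 * (pos + 1) * k + j + 1) / (pos + 1) = 4 * k + 1 + j / (pos + 1) := by
    rw [hidx, Nat.mul_add_div hL]
  have hdm := Nat.div_add_mod j (pos + 1)
  have hmlt : j % (pos + 1) < pos + 1 := Nat.mod_lt _ hL
  have hq4 : j / (pos + 1) < 4 := by rw [Nat.div_lt_iff_lt_mul hL]; omega
  unfold patAt
  rw [hdiv]
  have hmod : (4 * k + 1 + j / (pos + 1)) % 4 = (1 + j / (pos + 1)) % 4 := by
    rw [show 4 * k + 1 + j / (pos + 1) = 1 + j / (pos + 1) + 4 * k from by ring]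
    exact Nat.add_mul_mod_self_left _ 4 k
  rw [hmod]
  have hcases := nat_lt_four _ hq4
  rcases hcases with h | h | h | h <;> rw [h] at hdm ⊢
  · rw [if_pos (by omega : j < pos + 1)]; rfl
  · rw [if_neg (by omega : ¬ j < pos + 1), if_pos (by omega : j < 2 * (pos + 1))]; rfl
  · rw [if_neg (by omega : ¬ j < pos + 1), if_neg (by omega : ¬ j < 2 * (pos + 1)),
        if_pos (by omega : j < 3 * (pos + 1))]; rfl
  · rw [if_neg (by omega : ¬ j < pos + 1), if_neg (by omega : ¬ j < 2 * (pos + 1)),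
        if_neg (by omega : ¬ j < 3 * (pos + 1))]; rfl

-- pattern is 0 before index pos
theorem patAt_zero_of_lt (pos i : Nat) (h : i < pos) : patAt pos i = 0 := by
  unfold patAt
  have : (i + 1) / (pos + 1) = 0 := Nat.div_eq_of_lt (by omega)
  simp [this]

-- foldl accumulation is the Finset sum
theorem foldl_range_sum (f : Nat → Int) (n : Nat) :
    (List.range n).foldl (fun acc i => acc + f i) 0 = ∑ i ∈ Finset.range n, f i := by
  induction n with
  | zero => simp
  | succ n ih => rw [List.range_succ, List.foldl_append, Finset.sum_range_succ, ih]; simp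

-- one unfolding of the loop
theorem blockLoop_step (pre : List Int) (n pos start : Nat) (s : Int) (h : start < n) :
    blockLoop pre n pos start s
      = blockLoop pre n pos (start + 4 * (pos + 1))
          (if start + 2 * (pos + 1) < n
           then s + (pre.getD (min (start + (pos + 1)) n) 0 - pre.getD start 0)
                  - (pre.getD (min (start + 3 * (pos + 1)) n) 0 - pre.getD (start + 2 * (pos + 1)) 0)
           else s + (pre.getD (min (start + (pos + 1)) n) 0 - pre.getD start 0)) := by
  rw [blockLoop]
  simp only [dif_pos h]

-- main loop invariant: blockLoop accumulates the pattern-weighted tail sum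
theorem blockLoop_eq (nums : List Int) (pos : Nat) :
    ∀ (fuel start : Nat) (s : Int), nums.length - start ≤ fuel →
    (∃ k, start = pos + 4 * (pos + 1) * k) →
    blockLoop (List.scanl (· + ·) 0 nums) nums.length pos start s
      = s + ∑ i ∈ Finset.Ico start nums.length, nums.getD i 0 * patAt pos i := by
  intro fuel
  induction fuel with
  | zero =>
    intro start s hfuel _
    rw [blockLoop, dif_neg (by omega), Finset.Ico_eq_empty (by omega)]
    simp
  | succ fuel ih =>
    intro start s hfuel hex
    obtain ⟨k, hstart⟩ := hex
    by_cases hlt : start < nums.length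
    case neg =>
      rw [blockLoop, dif_neg hlt, Finset.Ico_eq_empty (by omega)]
      simp
    case pos =>
    have hL : 0 < pos + 1 := Nat.succ_pos pos
    have hpat : ∀ i, start ≤ i → i < start + 4 * (pos + 1) →
        patAt pos i = (if i - start < pos + 1 then 1
          else if i - start < 2 * (pos + 1) then 0
          else if i - start < 3 * (pos + 1) then -1 else 0) := by
      intro i h1 h2
      have e : pos + 4 * (pos + 1) * k + (i - start) = i := by rw [← hstart]; omega
      conv_lhs => rw [← e]
      rw [patAt_period pos k (i - start) (by omega)]
    have hx1 : (∑ i ∈ Finset.Ico start (min (start + (pos + 1)) nums.length),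
          nums.getD i 0 * patAt pos i)
        + ∑ i ∈ Finset.Ico (min (start + (pos + 1)) nums.length)
            (min (start + 2 * (pos + 1)) nums.length), nums.getD i 0 * patAt pos i
        = ∑ i ∈ Finset.Ico start (min (start + 2 * (pos + 1)) nums.length),
            nums.getD i 0 * patAt pos i :=
      Finset.sum_Ico_consecutive _ (by omega) (by omega)
    have hx2 : (∑ i ∈ Finset.Ico start (min (start + 2 * (pos + 1)) nums.length),
          nums.getD i 0 * patAt pos i)
        + ∑ i ∈ Finset.Ico (min (start + 2 * (pos + 1)) nums.length)
            (min (start + 3 * (pos + 1)) nums.length), nums.getD i 0 * patAt pos i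
        = ∑ i ∈ Finset.Ico start (min (start + 3 * (pos + 1)) nums.length),
            nums.getD i 0 * patAt pos i :=
      Finset.sum_Ico_consecutive _ (by omega) (by omega)
    have hx3 : (∑ i ∈ Finset.Ico start (min (start + 3 * (pos + 1)) nums.length),
          nums.getD i 0 * patAt pos i)
        + ∑ i ∈ Finset.Ico (min (start + 3 * (pos + 1)) nums.length)
            (min (start + 4 * (pos + 1)) nums.length), nums.getD i 0 * patAt pos i
        = ∑ i ∈ Finset.Ico start (min (start + 4 * (pos + 1)) nums.length),
            nums.getD i 0 * patAt pos i :=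
      Finset.sum_Ico_consecutive _ (by omega) (by omega)
    have hx4 : (∑ i ∈ Finset.Ico start (min (start + 4 * (pos + 1)) nums.length),
          nums.getD i 0 * patAt pos i)
        + ∑ i ∈ Finset.Ico (min (start + 4 * (pos + 1)) nums.length) nums.length,
            nums.getD i 0 * patAt pos i
        = ∑ i ∈ Finset.Ico start nums.length, nums.getD i 0 * patAt pos i :=
      Finset.sum_Ico_consecutive _ (by omega) (by omega)
    have hsplit : ∑ i ∈ Finset.Ico start nums.length, nums.getD i 0 * patAt pos i
        = (∑ i ∈ Finset.Ico start (min (start + (pos + 1)) nums.length),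
            nums.getD i 0 * patAt pos i)
        + (∑ i ∈ Finset.Ico (min (start + (pos + 1)) nums.length)
            (min (start + 2 * (pos + 1)) nums.length), nums.getD i 0 * patAt pos i)
        + (∑ i ∈ Finset.Ico (min (start + 2 * (pos + 1)) nums.length)
            (min (start + 3 * (pos + 1)) nums.length), nums.getD i 0 * patAt pos i)
        + (∑ i ∈ Finset.Ico (min (start + 3 * (pos + 1)) nums.length)
            (min (start + 4 * (pos + 1)) nums.length), nums.getD i 0 * patAt pos i)
        + (∑ i ∈ Finset.Ico (min (start + 4 * (pos + 1)) nums.length) nums.length,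
            nums.getD i 0 * patAt pos i) := by
      rw [hx1, hx2, hx3, hx4]
    have hc1 : ∑ i ∈ Finset.Ico start (min (start + (pos + 1)) nums.length),
          nums.getD i 0 * patAt pos i
        = (List.scanl (· + ·) 0 nums).getD (min (start + (pos + 1)) nums.length) 0
          - (List.scanl (· + ·) 0 nums).getD start 0 := by
      rw [pre_diff nums start _ (by omega) (by omega)]
      apply Finset.sum_congr rfl
      intro i hi
      rw [Finset.mem_Ico] at hi
      rw [hpat i hi.1 (by omega), if_pos (by omega), mul_one]
    have hc2 : ∑ i ∈ Finset.Ico (min (start + (pos + 1)) nums.length)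
          (min (start + 2 * (pos + 1)) nums.length), nums.getD i 0 * patAt pos i = 0 := by
      apply Finset.sum_eq_zero
      intro i hi
      rw [Finset.mem_Ico] at hi
      rw [hpat i (by omega) (by omega), if_neg (by omega), if_pos (by omega), mul_zero]
    have hc4 : ∑ i ∈ Finset.Ico (min (start + 3 * (pos + 1)) nums.length)
          (min (start + 4 * (pos + 1)) nums.length), nums.getD i 0 * patAt pos i = 0 := by
      apply Finset.sum_eq_zero
      intro i hi
      rw [Finset.mem_Ico] at hi
      rw [hpat i (by omega) (by omega), if_neg (by omega), if_neg (by omega),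
          if_neg (by omega), mul_zero]
    rw [blockLoop_step _ _ _ _ _ hlt]
    by_cases hcond : start + 2 * (pos + 1) < nums.length
    · have hc3 : ∑ i ∈ Finset.Ico (min (start + 2 * (pos + 1)) nums.length)
            (min (start + 3 * (pos + 1)) nums.length), nums.getD i 0 * patAt pos i
          = -((List.scanl (· + ·) 0 nums).getD (min (start + 3 * (pos + 1)) nums.length) 0
              - (List.scanl (· + ·) 0 nums).getD (start + 2 * (pos + 1)) 0) := by
        have hm2e : min (start + 2 * (pos + 1)) nums.length = start + 2 * (pos + 1) := by omega
        rw [hm2e]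
        calc ∑ i ∈ Finset.Ico (start + 2 * (pos + 1))
                (min (start + 3 * (pos + 1)) nums.length), nums.getD i 0 * patAt pos i
            = ∑ i ∈ Finset.Ico (start + 2 * (pos + 1))
                (min (start + 3 * (pos + 1)) nums.length), -(nums.getD i 0) := by
              apply Finset.sum_congr rfl
              intro i hi
              rw [Finset.mem_Ico] at hi
              rw [hpat i (by omega) (by omega), if_neg (by omega), if_neg (by omega),
                  if_pos (by omega)]
              ring
          _ = -∑ i ∈ Finset.Ico (start + 2 * (pos + 1))
                (min (start + 3 * (pos + 1)) nums.length), nums.getD i 0 := by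
              rw [Finset.sum_neg_distrib]
          _ = -((List.scanl (· + ·) 0 nums).getD (min (start + 3 * (pos + 1)) nums.length) 0
              - (List.scanl (· + ·) 0 nums).getD (start + 2 * (pos + 1)) 0) := by
              rw [pre_diff nums _ _ (by omega) (by omega)]
      have hm4e : min (start + 4 * (pos + 1)) nums.length = start + 4 * (pos + 1) ∨
          ¬ min (start + 4 * (pos + 1)) nums.length < nums.length := by omega
      have htail : ∑ i ∈ Finset.Ico (min (start + 4 * (pos + 1)) nums.length) nums.length,
            nums.getD i 0 * patAt pos i
          = ∑ i ∈ Finset.Ico (start + 4 * (pos + 1)) nums.length,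
            nums.getD i 0 * patAt pos i := by
        rcases hm4e with h | h
        · rw [h]
        · rw [Finset.Ico_eq_empty h, Finset.Ico_eq_empty (by omega)]
      rw [if_pos hcond,
          ih (start + 4 * (pos + 1)) _ (by omega) ⟨k + 1, by rw [hstart]; ring⟩,
          hsplit, hc1, hc2, hc3, hc4, htail]
      ring
    · have hc3 : ∑ i ∈ Finset.Ico (min (start + 2 * (pos + 1)) nums.length)
            (min (start + 3 * (pos + 1)) nums.length), nums.getD i 0 * patAt pos i = 0 := by
        rw [Finset.Ico_eq_empty (by omega)]
        simp
      have htail : ∑ i ∈ Finset.Ico (min (start + 4 * (pos + 1)) nums.length) nums.length,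
            nums.getD i 0 * patAt pos i = 0 := by
        rw [Finset.Ico_eq_empty (by omega)]
        simp
      have htail2 : ∑ i ∈ Finset.Ico (start + 4 * (pos + 1)) nums.length,
            nums.getD i 0 * patAt pos i = 0 := by
        rw [Finset.Ico_eq_empty (by omega)]
        simp
      rw [if_neg hcond,
          ih (start + 4 * (pos + 1)) _ (by omega) ⟨k + 1, by rw [hstart]; ring⟩,
          hsplit, hc1, hc2, hc3, hc4, htail, htail2]
      ring

-- the two per-position accumulations agree
theorem per_pos_eq (nums : List Int) (pos : Nat) (hpos : pos < nums.length) :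
    blockLoop (List.scanl (· + ·) 0 nums) nums.length pos pos 0
      = (List.range nums.length).foldl (fun acc i => acc + nums.getD i 0 * patAt pos i) 0 := by
  rw [foldl_range_sum, blockLoop_eq nums pos nums.length pos 0 (by omega) ⟨0, by omega⟩]
  rw [Finset.range_eq_Ico,
      ← Finset.sum_Ico_consecutive (fun i => nums.getD i 0 * patAt pos i)
        (Nat.zero_le pos) (le_of_lt hpos)]
  have hz : ∑ i ∈ Finset.Ico 0 pos, nums.getD i 0 * patAt pos i = 0 := by
    apply Finset.sum_eq_zero
    intro i hi
    rw [Finset.mem_Ico] at hi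
    rw [patAt_zero_of_lt pos i hi.2]
    ring
  rw [hz]

-- ===== VERDICT (by name: the statement is the Claim_ definition above) =====
theorem pass_filter_spec : Claim_equal_pass_filter := by
  intro nums _
  unfold Spec_pass_filter pass_filter pass_filter_alt
  apply List.map_congr_left
  intro pos hpos
  rw [List.mem_range] at hpos
  rw [per_pos_eq nums pos hpos]
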